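-- pv_equiv track=rewrite | github.com/bluan2019/OpenNMT-py | CTranslate2/server.py | remove_repeat_token
-- ===== SOURCE A (Python) =====
-- def remove_repeat_token(sentence, max_ngram_length = 4):
--     final_merge_sent = sentence.split(' ')
--     if len(final_merge_sent) < 3:
--         return sentence
--     max_ngram_length = min(max_ngram_length, len(sentence))
--     for i in range(max_ngram_length, 0, -1):
--         start = 0
--         end = len(final_merge_sent) - i + 1
--         ngrams = []
--         while start < end:
--             ngrams.append(final_merge_sent[start: start + i])
--             start += 1
--         result = []
--         for cur_word in ngrams:
--             result.append(cur_word)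
--             if len(result) > i:
--                 pre_word = result[len(result) - i - 1]
--                 if pre_word == cur_word:
--                     for k in range(i):
--                         result.pop()
--
--         cur_merge_sent = []
--         for word in result:
--             if not cur_merge_sent:
--                 cur_merge_sent.extend(word)
--             else:
--                 cur_merge_sent.append(word[-1])
--         final_merge_sent = cur_merge_sent
--
--     return ' '.join(final_merge_sent)
-- ===== SOURCE B (Python) =====
-- def remove_repeat_token(sentence, max_ngram_length = 4):
--     # Collapse consecutive repeated i-grams directly on the token list,
--     # without materialising the ngram-window list or a reconstruction pass.
--     words = sentence.split(' ')
--     if len(words) < 3: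
--         return sentence
--     max_ngram_length = min(max_ngram_length, len(sentence))
--     for i in range(max_ngram_length, 0, -1):
--         out = []
--         for j in range(len(words) - i + 1):
--             if j == 0:
--                 out.extend(words[0:i])
--             else:
--                 out.append(words[j + i - 1])
--             if len(out) >= 2 * i and out[-2 * i:-i] == out[-i:]:
--                 del out[-i:]
--         words = out
--     return ' '.join(words)
-- ===== Notes on version B (the rewrite author's own statement) =====
-- stated objective: simpler
-- what changed: Each i-gram pass collapses repeats directly on the token list in one sweep (compare/delete the last i tokens via slices), instead of materialising the list of all i-gram windows, deduplicating window objects, and reconstructing the tokens in a separate pass.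
import Mathlib
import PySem

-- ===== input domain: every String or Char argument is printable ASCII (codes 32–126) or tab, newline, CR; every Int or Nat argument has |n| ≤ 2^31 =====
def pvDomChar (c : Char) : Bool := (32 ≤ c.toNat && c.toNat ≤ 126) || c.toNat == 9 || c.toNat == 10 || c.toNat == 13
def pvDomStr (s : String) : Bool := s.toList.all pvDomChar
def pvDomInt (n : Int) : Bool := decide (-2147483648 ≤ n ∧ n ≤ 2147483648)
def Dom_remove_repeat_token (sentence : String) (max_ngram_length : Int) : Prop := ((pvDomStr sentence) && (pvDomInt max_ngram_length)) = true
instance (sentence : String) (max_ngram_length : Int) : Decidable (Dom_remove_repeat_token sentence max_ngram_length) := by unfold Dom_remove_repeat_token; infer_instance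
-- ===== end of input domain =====

-- B removes A's ngram-list materialisation and reconstruction pass, collapsing repeated
-- i-grams directly on the token list in a single sweep per i (objective: simpler).


-- ===== PORT A =====
-- one pass of A's outer loop (the body of `for i in range(max_ngram_length, 0, -1)`)
def pyA_pass (words : List String) (i : Int) : List String :=
  -- while start < end: ngrams.append(final_merge_sent[start : start + i])
  let ngrams : List (List String) :=
    (PySem.List.pyRange 0 ((words.length : Int) - i + 1) 1).foldl
      (fun ng start => ng ++ [PySem.List.slice words (some start) (some (start + i))]) []
  -- for cur_word in ngrams: append; maybe pop i times
  let result : List (List String) :=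
    ngrams.foldl
      (fun res cur =>
        let res' := res ++ [cur]
        if i < (res'.length : Int) then
          let pre := PySem.List.pyGetD res' ((res'.length : Int) - i - 1) []
          if pre = cur then
            (PySem.List.pyRange 0 i 1).foldl (fun r _ => r.dropLast) res'  -- for k in range(i): result.pop()
          else res'
        else res')
      []
  -- reconstruction: extend first word, then append word[-1]
  result.foldl
    (fun acc word =>
      if acc.isEmpty then acc ++ word else acc ++ [PySem.List.pyGetD word (-1) ""])
    []

def remove_repeat_token (sentence : String) (max_ngram_length : Int) : String :=
  let final_merge_sent := (PySem.Str.split? sentence " ").getD []   -- separator " " ≠ "": split? never none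
  if final_merge_sent.length < 3 then sentence
  else
    let m := min max_ngram_length (PySem.Str.len sentence)
    PySem.Str.join " " ((PySem.List.pyRange m 0 (-1)).foldl pyA_pass final_merge_sent)

-- ===== PORT B =====
-- one pass of B's outer loop: token-level sweep over window positions
def pyB_pass (ws : List String) (i : Int) : List String :=
  (PySem.List.pyRange 0 ((ws.length : Int) - i + 1) 1).foldl
    (fun out j =>
      let out' := if j = 0 then out ++ PySem.List.slice ws (some 0) (some i)
                  else out ++ [PySem.List.pyGetD ws (j + i - 1) ""]
      if 2 * i ≤ (out'.length : Int) ∧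
         PySem.List.slice out' (some (-(2 * i))) (some (-i)) = PySem.List.slice out' (some (-i)) none
      then PySem.List.slice out' none (some (-i))    -- del out[-i:]
      else out')
    []

def remove_repeat_token_alt (sentence : String) (max_ngram_length : Int) : String :=
  let words := (PySem.Str.split? sentence " ").getD []
  if words.length < 3 then sentence
  else
    let m := min max_ngram_length (PySem.Str.len sentence)
    PySem.Str.join " " ((PySem.List.pyRange m 0 (-1)).foldl pyB_pass words)

-- ===== PRECONDITION & SPEC =====
def Spec_remove_repeat_token (sentence : String) (max_ngram_length : Int) (out : String) : Prop := out = remove_repeat_token_alt sentence max_ngram_length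
instance (sentence : String) (max_ngram_length : Int) (out : String) : Decidable (Spec_remove_repeat_token sentence max_ngram_length out) := by unfold Spec_remove_repeat_token; infer_instance

-- ===== CLAIM (what is proved, stated in full; the proofs are below) =====
def Claim_equal_remove_repeat_token : Prop := ∀ (sentence : String) (max_ngram_length : Int), Dom_remove_repeat_token sentence max_ngram_length → Spec_remove_repeat_token sentence max_ngram_length (remove_repeat_token sentence max_ngram_length)

-- ===== LEMMAS AND PROOFS =====

-- the i-gram window at position j (length i while j + i ≤ words.length)
def pvWin (ws : List String) (iN j : Nat) : List String := (ws.drop j).take iN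

-- Nat-level step of A's dedup loop on windows
def pvStepR (ws : List String) (iN : Nat) (res : List (List String)) (j : Nat) : List (List String) :=
  let res' := res ++ [pvWin ws iN j]
  if iN < res'.length ∧ res'.getD (res'.length - iN - 1) [] = pvWin ws iN j
  then res'.take (res'.length - iN) else res'

-- Nat-level step of B's token sweep
def pvStepO (ws : List String) (iN : Nat) (out : List String) (j : Nat) : List String :=
  let out' := if j = 0 then out ++ pvWin ws iN 0 else out ++ [ws.getD (j + iN - 1) ""]
  if 2 * iN ≤ out'.length ∧ ((out'.drop (out'.length - 2 * iN)).take iN = out'.drop (out'.length - iN))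
  then out'.take (out'.length - iN) else out'

-- the invariant tying A's window list to B's token list after processing positions 0..t-1
def pvInv (ws : List String) (iN t : Nat) (res : List (List String)) (out : List String) : Prop :=
  1 ≤ res.length ∧ out.length = res.length + iN - 1 ∧
  (∀ m, m < res.length → res.getD m [] = (out.drop m).take iN) ∧
  res.getD (res.length - 1) [] = pvWin ws iN (t - 1)

lemma pvFoldDropLast {α β : Type} (l : List β) (r : List α) :
    l.foldl (fun r _ => r.dropLast) r = r.take (r.length - l.length) := by
  induction l generalizing r with
  | nil => simp
  | cons a l ih =>
      rw [List.foldl_cons, ih r.dropLast, List.dropLast_eq_take, List.take_take]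
      simp only [List.length_take, List.length_cons]
      congr 1
      omega

lemma pvStepA_eq (ws : List String) (iN k : Nat) (hi : 1 ≤ iN) (res : List (List String)) :
    (fun (res : List (List String)) (cur : List String) =>
      let res' := res ++ [cur]
      if (iN : Int) < (res'.length : Int) then
        let pre := PySem.List.pyGetD res' ((res'.length : Int) - iN - 1) []
        if pre = cur then
          (PySem.List.pyRange 0 iN 1).foldl (fun r _ => r.dropLast) res'
        else res'
      else res') res (pvWin ws iN k) = pvStepR ws iN res k := by
  simp only [pvStepR]
  set res' := res ++ [pvWin ws iN k] with hres'
  by_cases h : iN < res'.length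
  · have h1 : (iN : Int) < (res'.length : Int) := by exact_mod_cast h
    rw [if_pos h1]
    have h2 : ((res'.length : Int) - iN - 1) = ((res'.length - iN - 1 : Nat) : Int) := by omega
    rw [h2, PySem.List.pyGetD_natCast]
    by_cases h3 : res'.getD (res'.length - iN - 1) [] = pvWin ws iN k
    · rw [if_pos h3, if_pos ⟨h, h3⟩, pvFoldDropLast, PySem.List.length_pyRange_one]
      simp
    · rw [if_neg h3, if_neg (by tauto)]
  · have h1 : ¬ ((iN : Int) < (res'.length : Int)) := by exact_mod_cast h
    rw [if_neg h1, if_neg (by tauto)]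

lemma pvSliceNegNeg {α : Type} (xs : List α) (a b : Nat) (ha : 0 < a) (hb : 0 < b) :
    PySem.List.slice xs (some (-(a : Int))) (some (-(b : Int))) =
      (xs.drop (xs.length - a)).take ((xs.length - b) - (xs.length - a)) := by
  simp [PySem.List.slice, PySem.List.clampIdx_neg_natCast _ _ ha, PySem.List.clampIdx_neg_natCast _ _ hb]

lemma pvStepB_eq (ws : List String) (iN k : Nat) (hi : 1 ≤ iN) (out : List String) :
    (fun (out : List String) (j : Int) =>
      let out' := if j = 0 then out ++ PySem.List.slice ws (some 0) (some (iN : Int))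
                  else out ++ [PySem.List.pyGetD ws (j + (iN : Int) - 1) ""]
      if 2 * (iN : Int) ≤ (out'.length : Int) ∧
         PySem.List.slice out' (some (-(2 * (iN : Int)))) (some (-(iN : Int))) = PySem.List.slice out' (some (-(iN : Int))) none
      then PySem.List.slice out' none (some (-(iN : Int)))
      else out') out (k : Int) = pvStepO ws iN out k := by
  simp only [pvStepO]
  have e0 : ((k : Int) = 0) = (k = 0) := by simp
  have eg : PySem.List.slice ws (some 0) (some (iN : Int)) = pvWin ws iN 0 := by
    have := PySem.List.slice_natCast_add ws 0 iN
    simpa [pvWin] using this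
  have eget : PySem.List.pyGetD ws ((k : Int) + (iN : Int) - 1) "" = ws.getD (k + iN - 1) "" := by
    have h2 : ((k : Int) + (iN : Int) - 1) = ((k + iN - 1 : Nat) : Int) := by omega
    rw [h2, PySem.List.pyGetD_natCast]
  have hout : (if (k : Int) = 0 then out ++ PySem.List.slice ws (some 0) (some (iN : Int))
      else out ++ [PySem.List.pyGetD ws ((k : Int) + (iN : Int) - 1) ""]) =
      (if k = 0 then out ++ pvWin ws iN 0 else out ++ [ws.getD (k + iN - 1) ""]) := by
    by_cases hk : k = 0
    · simp [hk, eg]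
    · rw [if_neg (by exact_mod_cast hk), if_neg hk, eget]
  rw [hout]
  set out' := if k = 0 then out ++ pvWin ws iN 0 else out ++ [ws.getD (k + iN - 1) ""] with ho
  have h2i : (-(2 * (iN : Int))) = (-((2 * iN : Nat) : Int)) := by push_cast; ring
  by_cases hc : 2 * iN ≤ out'.length
  · have hcI : 2 * (iN : Int) ≤ (out'.length : Int) := by exact_mod_cast hc
    have hsl : PySem.List.slice out' (some (-(2 * (iN : Int)))) (some (-(iN : Int))) =
        (out'.drop (out'.length - 2 * iN)).take iN := by
      rw [h2i, pvSliceNegNeg out' (2 * iN) iN (by omega) (by omega)]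
      congr 1
      omega
    have hsr : PySem.List.slice out' (some (-(iN : Int))) none = out'.drop (out'.length - iN) :=
      PySem.List.slice_from_neg_natCast out' iN (by omega)
    rw [hsl, hsr]
    by_cases h3 : (out'.drop (out'.length - 2 * iN)).take iN = out'.drop (out'.length - iN)
    · rw [if_pos ⟨hcI, h3⟩, if_pos ⟨hc, h3⟩, PySem.List.slice_to_neg_natCast out' iN (by omega)]
    · rw [if_neg (by tauto), if_neg (by tauto)]
  · have hcI : ¬ (2 * (iN : Int) ≤ (out'.length : Int)) := by exact_mod_cast hc
    rw [if_neg (by tauto), if_neg (by tauto)]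

lemma pvRecon (iN : Nat) (hi : 1 ≤ iN) :
    ∀ (res : List (List String)) (out : List String),
    1 ≤ res.length → out.length = res.length + iN - 1 →
    (∀ m, m < res.length → res.getD m [] = (out.drop m).take iN) →
    res.foldl
      (fun acc word =>
        if acc.isEmpty then acc ++ word else acc ++ [PySem.List.pyGetD word (-1) ""]) [] = out := by
  intro res
  induction res using List.reverseRecOn with
  | nil => intro out h1; simp at h1
  | append_singleton res₀ r ih =>
      intro out h1 h2 h3
      by_cases h0 : res₀ = []
      · subst h0
        simp only [List.nil_append, List.foldl_cons, List.foldl_nil, List.isEmpty_nil, if_pos,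
          List.length_cons, List.length_nil] at *
        have hr : r = out := by
          have := h3 0 (by omega)
          simpa [List.take_of_length_le (by omega : out.length ≤ iN)] using this
        simpa using hr
      · have hL0 : 1 ≤ res₀.length := by
          cases res₀ with | nil => exact absurd rfl h0 | cons a l => simp
      -- lengths
        have hlen : (res₀ ++ [r]).length = res₀.length + 1 := by simp
        have houtlen : out.length = res₀.length + iN := by omega
        have hout₀len : out.dropLast.length = res₀.length + iN - 1 := by
          simp [houtlen]
        have hsl₀ : ∀ m, m < res₀.length → res₀.getD m [] = (out.dropLast.drop m).take iN := by
          intro m hm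
          have := h3 m (by simp; omega)
          rw [List.getD_append _ _ _ _ (by omega)] at this
          rw [this, List.dropLast_eq_take, List.drop_take, List.take_take]
          congr 1
          omega
        have hrec := ih out.dropLast hL0 hout₀len hsl₀
        rw [List.foldl_append, List.foldl_cons, List.foldl_nil, hrec]
        have hne : ¬ out.dropLast.isEmpty := by
          simp only [List.isEmpty_iff]
          intro hcon
          have := congrArg List.length hcon
          simp [hout₀len] at this
          omega
        rw [if_neg hne]
        have hr : r = out.drop res₀.length := by
          have := h3 res₀.length (by simp)
          rw [List.getD_append_right _ _ _ _ (by omega)] at this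
          simp only [Nat.sub_self, List.getD_cons_zero] at this
          rw [this, List.take_of_length_le (by simp [houtlen])]
        have hdropne : out.drop res₀.length ≠ [] := by
          intro hcon
          have := congrArg List.length hcon
          simp [houtlen] at this
          omega
        rw [hr, PySem.List.pyGetD_neg_one _ _ hdropne]
        rw [List.getLast_drop]
        exact List.dropLast_concat_getLast _

lemma pvWin_len (ws : List String) (iN j : Nat) (h : j + iN ≤ ws.length) :
    (pvWin ws iN j).length = iN := by simp [pvWin]; omega

lemma pvGetD_take {α : Type} (l : List α) (k m : Nat) (d : α) (h : m < k) :
    (l.take k).getD m d = l.getD m d := by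
  simp [List.getD_eq_getElem?_getD, List.getElem?_take_of_lt h]

lemma pvWin_snoc (ws : List String) (iN j : Nat) (hi : 1 ≤ iN) (h : j + iN ≤ ws.length) :
    pvWin ws iN j = (ws.drop j).take (iN - 1) ++ [ws.getD (j + iN - 1) ""] := by
  have hstep : (ws.drop j).take iN = (ws.drop j).take ((iN - 1) + 1) := by congr 1; omega
  rw [pvWin, hstep, List.take_succ]
  have h2 : (ws.drop j)[iN - 1]? = some (ws.getD (j + iN - 1) "") := by
    rw [List.getElem?_drop]
    have hk : j + (iN - 1) = j + iN - 1 := by omega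
    rw [hk, List.getElem?_eq_getElem (by omega)]
    rw [List.getD_eq_getElem?_getD, List.getElem?_eq_getElem (by omega)]
    simp
  rw [h2]
  simp

lemma pvStep_inv (ws : List String) (iN t : Nat) (hi : 1 ≤ iN) (ht1 : 1 ≤ t)
    (ht : t + iN ≤ ws.length) (res : List (List String)) (out : List String)
    (h : pvInv ws iN t res out) :
    pvInv ws iN (t + 1) (pvStepR ws iN res t) (pvStepO ws iN out t) := by
  obtain ⟨hL, hol, hsl, hlast⟩ := h
  -- the last window sits at the very end of `out`, in full
  have hdl : out.drop (res.length - 1) = pvWin ws iN (t - 1) := by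
    have h1 := hsl (res.length - 1) (by omega)
    rw [h1] at hlast
    rw [← hlast, List.take_of_length_le (by simp; omega)]
  have hwlen : (pvWin ws iN t).length = iN := pvWin_len ws iN t ht
  -- key fact: the freshly appended token closes exactly the window at position t
  have hF : (out ++ [ws.getD (t + iN - 1) ""]).drop res.length = pvWin ws iN t := by
    rw [List.drop_append_of_le_length (by omega)]
    have hdrop : out.drop res.length = (ws.drop t).take (iN - 1) := by
      have e1 : out.drop res.length = (out.drop (res.length - 1)).drop 1 := by
        rw [List.drop_drop]; congr 1; omega
      have e2 : t - 1 + 1 = t := by omega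
      rw [e1, hdl, pvWin, List.drop_take, List.drop_drop, e2]
    rw [hdrop, ← pvWin_snoc ws iN t hi ht]
  -- abbreviations for the appended states
  set resA := res ++ [pvWin ws iN t] with hresA
  set outA := out ++ [ws.getD (t + iN - 1) ""] with houtA
  have hLA : resA.length = res.length + 1 := by simp [hresA]
  have holA : outA.length = res.length + iN := by rw [houtA, List.length_append]; simp; omega
  -- the slice invariant for the appended states
  have hslA : ∀ m, m < resA.length → resA.getD m [] = (outA.drop m).take iN := by
    intro m hm
    rcases Nat.lt_or_ge m res.length with hml | hmr
    · rw [hresA, List.getD_append _ _ _ _ hml, hsl m hml, houtA,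
        List.drop_append_of_le_length (by omega), List.take_append_of_le_length (by simp; omega)]
    · have hmeq : m = res.length := by omega
      subst hmeq
      rw [hresA, List.getD_append_right _ _ _ _ (by omega)]
      simp only [Nat.sub_self, List.getD_cons_zero]
      rw [hF, List.take_of_length_le (by rw [hwlen])]
  -- the two step conditions coincide
  have hcond : (iN < resA.length ∧ resA.getD (resA.length - iN - 1) [] = pvWin ws iN t) ↔
      (2 * iN ≤ outA.length ∧
        ((outA.drop (outA.length - 2 * iN)).take iN = outA.drop (outA.length - iN))) := by
    constructor
    · rintro ⟨hc1, hc2⟩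
      refine ⟨by omega, ?_⟩
      have e1 : outA.length - 2 * iN = resA.length - iN - 1 := by omega
      have e2 : outA.length - iN = res.length := by omega
      rw [e1, e2, ← hslA (resA.length - iN - 1) (by omega), hc2, hF]
    · rintro ⟨hc1, hc2⟩
      refine ⟨by omega, ?_⟩
      have e1 : outA.length - 2 * iN = resA.length - iN - 1 := by omega
      have e2 : outA.length - iN = res.length := by omega
      rw [e1, e2, hF] at hc2
      rw [hslA (resA.length - iN - 1) (by omega), hc2]
  -- now split on the (common) condition
  rw [pvStepR, pvStepO]
  simp only [← hresA, Nat.add_eq_zero, if_neg (show ¬ t = 0 by omega), ← houtA]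
  by_cases hc : iN < resA.length ∧ resA.getD (resA.length - iN - 1) [] = pvWin ws iN t
  · rw [if_pos hc, if_pos (hcond.mp hc)]
    obtain ⟨hc1, hc2⟩ := hc
    have e2 : outA.length - iN = res.length := by omega
    refine ⟨by simp [List.length_take]; omega, by simp [List.length_take]; omega, ?_, ?_⟩
    · intro m hm
      simp only [List.length_take] at hm
      rw [pvGetD_take _ _ _ _ (by omega), hslA m (by omega), e2]
      rw [List.drop_take, List.take_take]
      congr 1
      omega
    · have e3 : (resA.take (resA.length - iN)).length - 1 = resA.length - iN - 1 := by
        simp only [List.length_take]; omega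
      have hm : (resA.take (resA.length - iN)).length - 1 < resA.length - iN := by
        rw [e3]; omega
      rw [pvGetD_take _ _ _ _ hm]
      rw [e3]
      rw [hc2]
      simp
  · rw [if_neg hc, if_neg (fun hcc => hc (hcond.mpr hcc))]
    refine ⟨by omega, by omega, hslA, ?_⟩
    have e4 : resA.length - 1 = res.length := by omega
    rw [e4, hresA, List.getD_append_right _ _ _ _ (by omega)]
    simp

lemma pvMainInv (ws : List String) (iN : Nat) (hi : 1 ≤ iN) (hn : iN ≤ ws.length) :
    ∀ t, 1 ≤ t → t ≤ ws.length - iN + 1 →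
    pvInv ws iN t ((List.range t).foldl (pvStepR ws iN) [])
      ((List.range t).foldl (pvStepO ws iN) []) := by
  intro t
  induction t with
  | zero => intro h1 _; omega
  | succ t ih =>
      intro _ h2
      rw [List.range_succ, List.foldl_append, List.foldl_append]
      simp only [List.foldl_cons, List.foldl_nil]
      by_cases ht0 : t = 0
      · subst ht0
        simp only [List.range_zero, List.foldl_nil]
        have hw : (pvWin ws iN 0).length = iN := pvWin_len ws iN 0 (by omega)
        have e1 : pvStepR ws iN [] 0 = [pvWin ws iN 0] := by
          rw [pvStepR]
          simp only [List.nil_append]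
          rw [if_neg (fun hcc => by have := hcc.1; simp at this; omega)]
        have e2 : pvStepO ws iN [] 0 = pvWin ws iN 0 := by
          rw [pvStepO]
          have e0 : (if (0 : Nat) = 0 then ([] : List String) ++ pvWin ws iN 0
              else [] ++ [ws.getD (0 + iN - 1) ""]) = pvWin ws iN 0 := by simp
          rw [e0, if_neg (fun hcc => by have := hcc.1; rw [hw] at this; omega)]
        rw [e1, e2]
        refine ⟨by simp, by simp [hw], ?_, by simp⟩
        intro m hm
        simp only [List.length_cons, List.length_nil] at hm
        have hm0 : m = 0 := by omega
        subst hm0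
        simp [pvWin, List.take_take]
      · exact pvStep_inv ws iN t hi (by omega) (by omega) _ _ (ih (by omega) (by omega))

lemma pvPass_eq (i : Int) (hi : 1 ≤ i) (ws : List String) : pyA_pass ws i = pyB_pass ws i := by
  obtain ⟨iN, rfl⟩ : ∃ iN : Nat, i = (iN : Int) := ⟨i.toNat, (Int.toNat_of_nonneg (by omega)).symm⟩
  have hiN : 1 ≤ iN := by exact_mod_cast hi
  rw [pyA_pass, pyB_pass]
  by_cases hn : iN ≤ ws.length
  · set N := ws.length - iN + 1 with hN
    have hN1 : 1 ≤ N := by omega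
    have hNc : ((ws.length : Int) - (iN : Int) + 1) = (N : Int) := by push_cast; omega
    rw [hNc]
    have hng : (PySem.List.pyRange 0 (N : Int) 1).foldl
        (fun ng start => ng ++ [PySem.List.slice ws (some start) (some (start + (iN : Int)))]) [] =
        (List.range N).map (pvWin ws iN) := by
      rw [PySem.List.pyRange_zero_nat, List.foldl_map, PySem.List.foldl_append_singleton_eq_map]
      simp only [List.nil_append]
      exact List.map_congr_left (fun k _ => by rw [PySem.List.slice_natCast_add]; rfl)
    rw [hng, List.foldl_map]
    have hA : (List.range N).foldl
        (fun res (k : Nat) =>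
          (fun (res : List (List String)) (cur : List String) =>
            let res' := res ++ [cur]
            if (iN : Int) < (res'.length : Int) then
              let pre := PySem.List.pyGetD res' ((res'.length : Int) - iN - 1) []
              if pre = cur then
                (PySem.List.pyRange 0 iN 1).foldl (fun r _ => r.dropLast) res'
              else res'
            else res') res (pvWin ws iN k)) [] =
        (List.range N).foldl (pvStepR ws iN) [] :=
      PySem.List.foldl_congr_mem _ _ _ _ (fun res k _ => pvStepA_eq ws iN k hiN res)
    have hB : (List.range N).foldl
        (fun out (k : Nat) =>
          (fun (out : List String) (j : Int) =>
            let out' := if j = 0 then out ++ PySem.List.slice ws (some 0) (some (iN : Int))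
                        else out ++ [PySem.List.pyGetD ws (j + (iN : Int) - 1) ""]
            if 2 * (iN : Int) ≤ (out'.length : Int) ∧
               PySem.List.slice out' (some (-(2 * (iN : Int)))) (some (-(iN : Int))) = PySem.List.slice out' (some (-(iN : Int))) none
            then PySem.List.slice out' none (some (-(iN : Int)))
            else out') out (k : Int)) [] =
        (List.range N).foldl (pvStepO ws iN) [] :=
      PySem.List.foldl_congr_mem _ _ _ _ (fun out k _ => pvStepB_eq ws iN k hiN out)
    rw [hA, PySem.List.pyRange_zero_nat, List.foldl_map, hB]
    obtain ⟨h1, h2, h3, _⟩ := pvMainInv ws iN hiN hn N hN1 (le_refl N)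
    exact pvRecon iN hiN _ _ h1 h2 h3
  · have hnil : PySem.List.pyRange 0 ((ws.length : Int) - (iN : Int) + 1) 1 = [] :=
      PySem.List.pyRange_one_eq_nil (by omega)
    rw [hnil]
    simp

theorem remove_repeat_token_spec : Claim_equal_remove_repeat_token := by
  intro sentence m _
  unfold Spec_remove_repeat_token remove_repeat_token remove_repeat_token_alt
  simp only
  split
  · rfl
  · congr 1
    exact PySem.List.foldl_congr_mem _ _ _ _ (fun acc i hmem => by
      have h := (PySem.List.mem_pyRange_neg_one).mp hmem
      exact pvPass_eq i (by omega) acc)
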